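-- pv_equiv track=rewrite | github.com/Swires221103/FINESSE-REP | 2b_calibration_functions_chris.py | find_dist_to_bb
-- ===== SOURCE A (Python) =====
-- def find_dist_to_bb(script, current_index, angle_to_find):
--
--     """
--     Given the current index of the data within the FINESSE Script, finds
--     the distance to the HBB and CBB (given as 270 deg or 225 deg respectively)
--
--     Args:
--         script: The script that FINESSE uses to take measurements eg [270,225,30,250]
--         current_index: where in the script the current file is
--         angle_to_find: angle of the BB to find eg 270 for the HBB
--
--     Returns:
--         The distance to the nearest BB measurement requried
--     """
--     bb_min_dist = 1000
--     actual_distance = 0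
--     for i, ang in enumerate(script):
--         d=0
--         if abs(ang-angle_to_find) < 2.5:
--             d = abs(i - current_index)
--             if d < bb_min_dist:
--                 bb_min_dist = d
--                 actual_distance = i-current_index
--
--     return actual_distance
-- ===== SOURCE B (Python) =====
-- def find_dist_to_bb(script, current_index, angle_to_find):
--     n = len(script)
--     for d in range(1000):
--         lo = current_index - d
--         hi = current_index + d
--         if lo < 0 and hi >= n:
--             break
--         if 0 <= lo < n and abs(script[lo] - angle_to_find) < 2.5:
--             return -d
--         if d and 0 <= hi < n and abs(script[hi] - angle_to_find) < 2.5: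
--             return d
--     return 0
-- ===== Notes on version B (the rewrite author's own statement) =====
-- stated objective: faster
-- what changed: Replaces A's full scan keeping a running best with an outward expanding search from current_index (lower index tried first at each radius), stopping at radius 999 because A's bb_min_dist sentinel of 1000 means it never reports a match 1000 or more steps away.
import Mathlib
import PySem

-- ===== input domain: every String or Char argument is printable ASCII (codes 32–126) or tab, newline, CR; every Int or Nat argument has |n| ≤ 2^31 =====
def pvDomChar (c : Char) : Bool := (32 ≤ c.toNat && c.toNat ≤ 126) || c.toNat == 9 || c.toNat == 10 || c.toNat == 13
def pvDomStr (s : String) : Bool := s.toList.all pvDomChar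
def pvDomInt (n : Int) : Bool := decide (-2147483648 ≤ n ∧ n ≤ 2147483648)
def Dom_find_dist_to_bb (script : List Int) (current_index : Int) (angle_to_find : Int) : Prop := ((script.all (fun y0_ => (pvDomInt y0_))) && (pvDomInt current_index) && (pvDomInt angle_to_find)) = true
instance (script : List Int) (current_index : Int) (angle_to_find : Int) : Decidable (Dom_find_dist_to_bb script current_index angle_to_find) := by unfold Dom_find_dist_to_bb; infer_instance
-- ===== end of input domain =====

-- B replaces A's full scan with an outward expanding search from current_index, capped at radius 999 (A's 1000 sentinel means farther matches are never reported); proved equal to A on all inputs.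


-- ===== PORT A =====
-- Literal port of A: fold over enumerate(script) carrying (bb_min_dist, actual_distance),
-- initial state (1000, 0).  On Int angles, abs(ang - angle_to_find) < 2.5  ⇔  |ang - angle_to_find| ≤ 2 (exact).
def find_dist_to_bb (script : List Int) (current_index : Int) (angle_to_find : Int) : Int :=
  ((PySem.List.enumerate script).foldl
    (fun (st : Int × Int) (p : Int × Int) =>
      if |p.2 - angle_to_find| ≤ 2 then
        let d := |p.1 - current_index|
        if d < st.1 then (d, p.1 - current_index) else st
      else st)
    (1000, 0)).2

-- ===== PORT B =====
-- B: outward expanding search, radius d = 0, 1, …, 999 (the 'for d in range(1000)' loop of Source B,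
-- ported with the remaining iteration count as structural fuel); at each radius the lower index
-- current_index - d is tried before current_index + d; break once the window covers no valid index.
def pvSearchB (script : List Int) (current_index : Int) (angle_to_find : Int) : Nat → Int → Int
  | 0, _ => 0
  | fuel + 1, d =>
    let n : Int := (script.length : Int)
    let lo := current_index - d
    let hi := current_index + d
    if lo < 0 ∧ n ≤ hi then 0
    else if 0 ≤ lo ∧ lo < n ∧ |PySem.List.pyGetD script lo 0 - angle_to_find| ≤ 2 then -d
    else if d ≠ 0 ∧ 0 ≤ hi ∧ hi < n ∧ |PySem.List.pyGetD script hi 0 - angle_to_find| ≤ 2 then d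
    else pvSearchB script current_index angle_to_find fuel (d + 1)

def find_dist_to_bb_alt (script : List Int) (current_index : Int) (angle_to_find : Int) : Int :=
  pvSearchB script current_index angle_to_find 1000 0

-- ===== PRECONDITION & SPEC =====
def Spec_find_dist_to_bb (script : List Int) (current_index : Int) (angle_to_find : Int) (out : Int) : Prop := out = find_dist_to_bb_alt script current_index angle_to_find
instance (script : List Int) (current_index : Int) (angle_to_find : Int) (out : Int) : Decidable (Spec_find_dist_to_bb script current_index angle_to_find out) := by unfold Spec_find_dist_to_bb; infer_instance

-- ===== CLAIM (what is proved, stated in full; the proofs are below) =====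
def Claim_equal_find_dist_to_bb : Prop := ∀ (script : List Int) (current_index : Int) (angle_to_find : Int), Dom_find_dist_to_bb script current_index angle_to_find → Spec_find_dist_to_bb script current_index angle_to_find (find_dist_to_bb script current_index angle_to_find)

-- ===== LEMMAS AND PROOFS =====

-- the list of matching indices
def pvMatches (script : List Int) (angle_to_find : Int) : List Int :=
  ((PySem.List.enumerate script).filter (fun p => |p.2 - angle_to_find| ≤ 2)).map (fun p => p.1)

-- A's step, acting on a bare index
def pvStep (c : Int) (st : Int × Int) (i : Int) : Int × Int :=
  if |i - c| < st.1 then (|i - c|, i - c) else st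

-- A's fold over enumerate = the same fold over the filtered index list
theorem pvFoldFilter (c a : Int) (l : List (Int × Int)) (init : Int × Int) :
    l.foldl
      (fun (st : Int × Int) (p : Int × Int) =>
        if |p.2 - a| ≤ 2 then
          let d := |p.1 - c|
          if d < st.1 then (d, p.1 - c) else st
        else st) init
    = ((l.filter (fun p => |p.2 - a| ≤ 2)).map (fun p => p.1)).foldl (pvStep c) init := by
  induction l generalizing init with
  | nil => rfl
  | cons p t ih =>
    by_cases h : |p.2 - a| ≤ 2 <;>
      simp [List.foldl_cons, h, ih, pvStep]

-- min? over a cons (specialized to Int keys)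
theorem pvMin?_cons (c x : Int) (t : List Int) :
    PySem.List.min? (x :: t) (fun i => |i - c|)
      = match PySem.List.min? t (fun i => |i - c|) with
        | none => some x
        | some m => if |m - c| < |x - c| then some m else some x := by
  induction t generalizing x with
  | nil => simp [PySem.List.min?]
  | cons y t ih =>
    have hstep : PySem.List.min? (x :: y :: t) (fun i => |i - c|)
        = PySem.List.min? ((if |y - c| < |x - c| then y else x) :: t) (fun i => |i - c|) := by
      by_cases h : |y - c| < |x - c| <;> simp [PySem.List.min?, h]
    rw [hstep, ih, ih y]
    by_cases h : |y - c| < |x - c| <;>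
      cases hm : PySem.List.min? t (fun i => |i - c|) <;>
        simp [h] <;> split_ifs <;> simp_all <;> omega

-- the fold with A's step equals a match on min?, for any start state
theorem pvFoldMin (c : Int) (ms : List Int) :
    ∀ bb act : Int, ms.foldl (pvStep c) (bb, act)
      = match PySem.List.min? ms (fun i => |i - c|) with
        | none => (bb, act)
        | some m => if |m - c| < bb then (|m - c|, m - c) else (bb, act) := by
  induction ms with
  | nil => intro bb act; simp [PySem.List.min?]
  | cons i t ih =>
    intro bb act
    rw [List.foldl_cons, pvMin?_cons]
    by_cases h : |i - c| < bb
    · have hstep : pvStep c (bb, act) i = (|i - c|, i - c) := by simp [pvStep, h]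
      rw [hstep, ih]
      cases hm : PySem.List.min? t (fun j => |j - c|) with
      | none => simp [h]
      | some m =>
        by_cases h2 : |m - c| < |i - c|
        · have hb : |m - c| < bb := by omega
          simp [h2, hb]
        · simp [h2, h]
    · have hstep : pvStep c (bb, act) i = (bb, act) := by simp [pvStep, h]
      rw [hstep, ih]
      cases hm : PySem.List.min? t (fun j => |j - c|) with
      | none => simp [h]
      | some m =>
        by_cases h2 : |m - c| < |i - c|
        · simp [h2]
        · have hb : ¬ |m - c| < bb := by omega
          simp [h2, h, hb]

-- A in closed form over min?
theorem pvA_eq (script : List Int) (c a : Int) :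
    find_dist_to_bb script c a
      = match PySem.List.min? (pvMatches script a) (fun i => |i - c|) with
        | none => 0
        | some m => if |m - c| < 1000 then m - c else 0 := by
  unfold find_dist_to_bb pvMatches
  rw [pvFoldFilter c a, pvFoldMin c]
  cases hm : PySem.List.min?
      (((PySem.List.enumerate script).filter (fun p => |p.2 - a| ≤ 2)).map (fun p => p.1))
      (fun i => |i - c|) with
  | none => rfl
  | some m => by_cases hb : |m - c| < 1000 <;> simp [hb]

-- membership in pvMatches, Nat-index form
theorem pvMem_matches (script : List Int) (a i : Int) :
    i ∈ pvMatches script a ↔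
      ∃ (k : Nat) (h : k < script.length), i = (k : Int) ∧ |script[k] - a| ≤ 2 := by
  unfold pvMatches
  simp only [List.mem_map, List.mem_filter, PySem.List.mem_enumerate_iff]
  constructor
  · rintro ⟨p, ⟨⟨k, hk, rfl⟩, hp⟩, rfl⟩
    simp only [decide_eq_true_eq] at hp
    exact ⟨k, hk, by simp, by simpa using hp⟩
  · rintro ⟨k, hk, rfl, hmatch⟩
    refine ⟨((0 : Int) + (k : Int), script[k]), ⟨⟨k, hk, rfl⟩, by simpa using hmatch⟩, by simp⟩

-- membership in pvMatches, Int-index form (as B's bounds checks see it)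
theorem pvMem_matches' (script : List Int) (a i : Int) :
    i ∈ pvMatches script a ↔
      0 ≤ i ∧ i < (script.length : Int) ∧ |PySem.List.pyGetD script i 0 - a| ≤ 2 := by
  rw [pvMem_matches]
  constructor
  · rintro ⟨k, hk, rfl, hm⟩
    refine ⟨Int.natCast_nonneg k, by exact_mod_cast hk, ?_⟩
    rw [PySem.List.pyGetD_natCast, List.getD_eq_getElem _ _ hk]
    exact hm
  · rintro ⟨h0, hn, hm⟩
    have hk : i.toNat < script.length := by omega
    refine ⟨i.toNat, hk, by omega, ?_⟩
    rw [← Int.toNat_of_nonneg h0, PySem.List.pyGetD_natCast, List.getD_eq_getElem _ _ hk] at hm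
    exact hm

-- pvMatches is strictly increasing (enumerate order)
theorem pvMatches_sorted (script : List Int) (a : Int) :
    (pvMatches script a).Pairwise (· < ·) := by
  unfold pvMatches
  exact List.pairwise_map.2 ((PySem.List.pairwise_lt_enumerate script 0).filter _)

-- min? returns x when x is a member of minimal key and the least index among key-ties
theorem pvMin?_first (c : Int) (l : List Int) (x : Int) (hx : x ∈ l)
    (hmin : ∀ y ∈ l, |x - c| ≤ |y - c|) (htie : ∀ y ∈ l, |y - c| = |x - c| → x ≤ y)
    (hasc : l.Pairwise (· < ·)) :
    PySem.List.min? l (fun i => |i - c|) = some x := by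
  induction l with
  | nil => simp at hx
  | cons z t ih =>
    rw [pvMin?_cons]
    rcases List.mem_cons.1 hx with rfl | hxt
    · cases hm : PySem.List.min? t (fun i => |i - c|) with
      | none => rfl
      | some m =>
        have hmem := PySem.List.min?_mem hm
        have : |x - c| ≤ |m - c| := hmin m (List.mem_cons_of_mem _ hmem)
        simp only
        rw [if_neg (by omega)]
    · have hz : z < x := (List.pairwise_cons.1 hasc).1 x hxt
      have hle : |x - c| ≤ |z - c| := hmin z List.mem_cons_self
      have hne : |z - c| ≠ |x - c| := fun h => absurd (htie z List.mem_cons_self h) (by omega)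
      rw [ih hxt (fun y hy => hmin y (List.mem_cons_of_mem _ hy))
            (fun y hy h => htie y (List.mem_cons_of_mem _ hy) h) (List.pairwise_cons.1 hasc).2]
      simp only
      rw [if_pos (by omega)]

-- B's expanding search computes A's closed form, given no match closer than radius d
theorem pvSearch_eq (script : List Int) (c a : Int) :
    ∀ (fuel : Nat) (d : Int), 0 ≤ d → d + fuel = 1000 →
      (∀ i ∈ pvMatches script a, d ≤ |i - c|) →
      pvSearchB script c a fuel d
        = match PySem.List.min? (pvMatches script a) (fun i => |i - c|) with
          | none => 0
          | some m => if |m - c| < 1000 then m - c else 0 := by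
  intro fuel
  induction fuel with
  | zero =>
    intro d hd0 hd hfar
    cases hm : PySem.List.min? (pvMatches script a) (fun i => |i - c|) with
    | none => rfl
    | some m =>
      have := hfar m (PySem.List.min?_mem hm)
      simp only
      rw [if_neg (by omega)]
      simp [pvSearchB]
  | succ fuel ih =>
    intro d hd0 hd hfar
    have hd999 : d ≤ 999 := by omega
    simp only [pvSearchB]
    split_ifs with hbrk hlo hhi
    · -- window exhausted: no valid index remains at radius ≥ d, so pvMatches is empty
      obtain ⟨hneg, hbig⟩ := hbrk
      have hnil : pvMatches script a = [] := by
        rw [List.eq_nil_iff_forall_not_mem]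
        intro i hi
        obtain ⟨h0, hn, _⟩ := (pvMem_matches' script a i).1 hi
        have := hfar i hi
        have habs : |i - c| = if 0 ≤ i - c then i - c else -(i - c) := by
          split_ifs with h <;> [exact abs_of_nonneg h; exact abs_of_neg (by omega)]
        split_ifs at habs <;> omega
      rw [hnil]
      simp [PySem.List.min?]
    · -- match at the lower index c - d
      have hmem : (c - d) ∈ pvMatches script a := (pvMem_matches' script a _).2 hlo
      have hkey : |(c - d) - c| = d := by
        rw [show c - d - c = -d by ring, abs_neg, abs_of_nonneg hd0]
      rw [pvMin?_first c _ (c - d) hmem ?_ ?_ (pvMatches_sorted script a)]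
      · simp only
        rw [if_pos (by omega)]
        ring
      · intro y hy; have := hfar y hy; omega
      · intro y hy hk
        rw [hkey] at hk
        have habs : |y - c| = if 0 ≤ y - c then y - c else -(y - c) := by
          split_ifs with h <;> [exact abs_of_nonneg h; exact abs_of_neg (by omega)]
        split_ifs at habs <;> omega
    · -- match at the upper index c + d (and none at c - d)
      obtain ⟨hdne, hhi'⟩ := hhi
      have hmem : (c + d) ∈ pvMatches script a := (pvMem_matches' script a _).2 hhi'
      have hkey : |(c + d) - c| = d := by
        rw [show c + d - c = d by ring, abs_of_nonneg hd0]
      rw [pvMin?_first c _ (c + d) hmem ?_ ?_ (pvMatches_sorted script a)]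
      · simp only
        rw [if_pos (by omega)]
        ring
      · intro y hy; have := hfar y hy; omega
      · intro y hy hk
        rw [hkey] at hk
        have habs : |y - c| = if 0 ≤ y - c then y - c else -(y - c) := by
          split_ifs with h <;> [exact abs_of_nonneg h; exact abs_of_neg (by omega)]
        have hylo : y ≠ c - d := by
          intro hy'
          exact hlo (by rw [← hy']; exact (pvMem_matches' script a y).1 hy)
        split_ifs at habs <;> omega
    · -- no match at radius d: recurse at radius d + 1
      rw [ih (d + 1) (by omega) (by omega)]
      intro i hi
      have hge := hfar i hi
      by_contra hlt
      push_neg at hlt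
      have hkd : |i - c| = d := by omega
      have habs : |i - c| = if 0 ≤ i - c then i - c else -(i - c) := by
        split_ifs with h <;> [exact abs_of_nonneg h; exact abs_of_neg (by omega)]
      have hmem' := (pvMem_matches' script a i).1 hi
      have : i = c - d ∨ i = c + d := by split_ifs at habs <;> omega
      rcases this with rfl | rfl
      · exact hlo hmem'
      · apply hhi
        refine ⟨?_, hmem'⟩
        intro hd0'
        rw [hd0'] at hkd
        simp at hkd
        -- d = 0: c + 0 = c - 0, contradiction with the lo-branch being false
        exact hlo (by simpa [hd0'] using hmem')

-- ===== VERDICT (by name: the statement is the Claim_ definition above) =====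
theorem find_dist_to_bb_spec : Claim_equal_find_dist_to_bb := by
  intro script c a _
  unfold Spec_find_dist_to_bb find_dist_to_bb_alt
  rw [pvA_eq, pvSearch_eq script c a 1000 0 le_rfl rfl]
  intro i _
  exact abs_nonneg _
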